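-- pv_equiv track=rewrite | github.com/Yanto63/QR-Encoder | src/version_and_format.py | get_version_information_string
-- ===== SOURCE A (Python) =====
-- def get_version_information_string(version: int) -> str:
--     """Returns the version information string according to the given QR-Code version."""
--     if version < 7:
--         return
--     vs = ""
--     bin_version = format(version,'b')
--     for _ in range(6-len(bin_version)):
--         bin_version  = "0" + bin_version
--     vs += bin_version
--     generator_polynomial_coefficients = "1111100100101"
--     # Format string division.
--     dividende = vs + "000000000000"
--     while dividende[0] == "0":
--         dividende = dividende[1:]
--     while len(dividende) > 12:
--         gpc = generator_polynomial_coefficients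
--         for _ in range(len(dividende) - len(generator_polynomial_coefficients)):
--             gpc += "0"
--         dividende = format((int(dividende,base=2)^int(gpc,base=2)),'b')
--     for _ in range(12 - len(dividende)):
--         dividende = "0" + dividende
--     vs += dividende
--     return vs
-- ===== SOURCE B (Python) =====
-- def get_version_information_string(version: int) -> str:
--     """Returns the version information string according to the given QR-Code version."""
--     if version < 7:
--         return
--     bin_version = format(version, 'b').zfill(6)
--     rem = 0
--     for ch in bin_version + '0' * 12:
--         rem = 2 * rem + (ch == '1')
--         if rem >> 12:
--             rem ^= 0b1111100100101
--     return bin_version + format(rem, 'b').zfill(12)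
-- ===== Notes on version B (the rewrite author's own statement) =====
-- stated objective: alternative
-- what changed: Replaces A's repeated int<->binary-string conversions and whole-number strip-and-XOR long division with a single per-bit shift-register (CRC-style) pass maintaining a twelve-bit remainder.
import Mathlib
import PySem

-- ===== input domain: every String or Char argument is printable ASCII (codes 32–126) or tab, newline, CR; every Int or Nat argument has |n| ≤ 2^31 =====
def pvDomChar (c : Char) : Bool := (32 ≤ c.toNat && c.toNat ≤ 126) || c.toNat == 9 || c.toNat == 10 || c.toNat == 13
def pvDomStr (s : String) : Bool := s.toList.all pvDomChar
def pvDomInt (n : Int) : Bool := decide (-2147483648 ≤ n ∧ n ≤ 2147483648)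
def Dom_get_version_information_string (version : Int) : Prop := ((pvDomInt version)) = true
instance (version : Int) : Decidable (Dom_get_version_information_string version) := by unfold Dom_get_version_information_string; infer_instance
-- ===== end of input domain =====

-- B replaces A's repeated int<->binary-string strip-and-XOR long division by a one-pass
-- 12-bit shift-register reduction (alternative algorithm, same return value everywhere).

-- ===== PORT A =====
-- format(n, 'b') for n ≥ 0 (canonical binary, no leading zeros; "0" for 0); shared by both
-- Pythons, which both call format(·,'b').
def binFmt (n : Nat) : List Char :=
  if n < 2 then [if n = 1 then '1' else '0']
  else binFmt (n / 2) ++ [if n % 2 = 1 then '1' else '0']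
termination_by n
decreasing_by exact Nat.div_lt_self (by omega) (by omega)

-- int(s, base=2) on a string of '0'/'1' characters (only such strings ever reach it in A)
def binToNat (s : List Char) : Nat :=
  s.foldl (fun a c => 2 * a + (if c = '1' then 1 else 0)) 0

-- A's first while loop: strip leading '0' characters
def stripZeros : List Char → List Char
  | [] => []
  | c :: t => if c = '0' then stripZeros t else c :: t

-- A's second while loop (fuel only makes the recursion total; A's loop runs at most
-- len(dividende) times on the inputs it ever sees, and the port is called with that fuel)
def divide : Nat → List Char → List Char
  | 0, s => s
  | fuel + 1, s =>
    if s.length > 12 then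
      let gpc : List Char := ['1','1','1','1','1','0','0','1','0','0','1','0','1']
      let gpc := (List.range (s.length - gpc.length)).foldl (fun g _ => g ++ ['0']) gpc
      divide fuel (binFmt (binToNat s ^^^ binToNat gpc))
    else s

def get_version_information_string (version : Int) : Option String :=
  if version < 7 then none
  else
    let vs : List Char := []
    let bin_version := binFmt version.toNat
    let bin_version := (List.range (6 - bin_version.length)).foldl (fun b _ => '0' :: b) bin_version
    let vs := vs ++ bin_version
    let dividende := vs ++ List.replicate 12 '0'
    let dividende := stripZeros dividende
    let dividende := divide dividende.length dividende
    let dividende := (List.range (12 - dividende.length)).foldl (fun d _ => '0' :: d) dividende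
    some (String.mk (vs ++ dividende))

-- ===== PORT B =====
def get_version_information_string_alt (version : Int) : Option String :=
  if version < 7 then none
  else
    let bin_version := binFmt version.toNat
    let bin_version := List.replicate (6 - bin_version.length) '0' ++ bin_version  -- zfill(6)
    let rem := (bin_version ++ List.replicate 12 '0').foldl
      (fun rem ch =>
        let rem := 2 * rem + (if ch = '1' then 1 else 0)
        if rem >>> 12 ≠ 0 then rem ^^^ 7973 else rem) 0
    let rs := binFmt rem
    some (String.mk (bin_version ++ (List.replicate (12 - rs.length) '0' ++ rs)))  -- zfill(12)

-- ===== PRECONDITION & SPEC =====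
def Spec_get_version_information_string (version : Int) (out : Option String) : Prop := out = get_version_information_string_alt version
instance (version : Int) (out : Option String) : Decidable (Spec_get_version_information_string version out) := by unfold Spec_get_version_information_string; infer_instance

-- ===== CLAIM (what is proved, stated in full; the proofs are below) =====
def Claim_equal_get_version_information_string : Prop := ∀ (version : Int), Dom_get_version_information_string version → Spec_get_version_information_string version (get_version_information_string version)

-- ===== LEMMAS AND PROOFS =====

-- small list-shape lemmas
theorem foldl_range_prepend (k : Nat) (s : List Char) :
    (List.range k).foldl (fun b _ => '0' :: b) s = List.replicate k '0' ++ s := by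
  induction k with
  | zero => simp
  | succ k ih =>
      rw [List.range_succ, List.foldl_append, ih, List.replicate_succ]
      simp

theorem foldl_range_appendzero (k : Nat) (s : List Char) :
    (List.range k).foldl (fun g _ => g ++ ['0']) s = s ++ List.replicate k '0' := by
  induction k with
  | zero => simp
  | succ k ih =>
      rw [List.range_succ, List.foldl_append, ih, List.replicate_succ']
      simp

theorem stripZeros_replicate (k : Nat) (s : List Char) :
    stripZeros (List.replicate k '0' ++ s) = stripZeros s := by
  induction k with
  | zero => simp
  | succ k ih => simp [List.replicate_succ, stripZeros, ih]

-- binFmt facts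
theorem binFmt_head (n : Nat) (h : 1 ≤ n) : ∃ t, binFmt n = '1' :: t := by
  induction n using Nat.strong_induction_on with
  | _ n ih =>
    by_cases h2 : n < 2
    · have : n = 1 := by omega
      subst this
      exact ⟨[], by simp [binFmt]⟩
    · obtain ⟨t, ht⟩ := ih (n / 2) (Nat.div_lt_self (by omega) (by omega)) (by omega)
      refine ⟨t ++ [if n % 2 = 1 then '1' else '0'], ?_⟩
      rw [binFmt]
      simp [h2, ht]

theorem stripZeros_binFmt (n : Nat) (h : 1 ≤ n) : stripZeros (binFmt n) = binFmt n := by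
  obtain ⟨t, ht⟩ := binFmt_head n h
  rw [ht]; simp [stripZeros]

theorem binFmt_two_mul (n : Nat) (h : 1 ≤ n) : binFmt (2 * n) = binFmt n ++ ['0'] := by
  rw [binFmt]
  have h1 : ¬ (2 * n < 2) := by omega
  simp [h1, Nat.mul_div_cancel_left, Nat.mul_mod_right]

theorem binFmt_mul_pow (k n : Nat) (h : 1 ≤ n) :
    binFmt (n * 2 ^ k) = binFmt n ++ List.replicate k '0' := by
  induction k generalizing n with
  | zero => simp
  | succ k ih =>
      have : n * 2 ^ (k + 1) = (2 * n) * 2 ^ k := by ring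
      rw [this, ih (2 * n) (by omega), binFmt_two_mul n h, List.append_assoc]
      simp [List.replicate_succ]

theorem foldl_val_binFmt (n a : Nat) :
    (binFmt n).foldl (fun a c => 2 * a + (if c = '1' then 1 else 0)) a
      = a * 2 ^ (binFmt n).length + n := by
  induction n using Nat.strong_induction_on generalizing a with
  | _ n ih =>
    by_cases h2 : n < 2
    · interval_cases n <;> simp [binFmt] <;> ring
    · rw [binFmt]
      simp only [if_neg h2, List.foldl_append, List.length_append]
      rw [ih (n / 2) (Nat.div_lt_self (by omega) (by omega)) a]
      have hm : n % 2 = 1 ∨ n % 2 = 0 := by omega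
      rcases hm with hm | hm <;>
        simp [hm, pow_succ, List.length_append] <;> ring_nf <;> omega

theorem binToNat_binFmt (n : Nat) : binToNat (binFmt n) = n := by
  have := foldl_val_binFmt n 0
  simpa [binToNat] using this

theorem foldl_val_replicate (k a : Nat) :
    (List.replicate k '0').foldl (fun a c => 2 * a + (if c = '1' then 1 else 0)) a
      = a * 2 ^ k := by
  induction k generalizing a with
  | zero => simp
  | succ k ih =>
      rw [List.replicate_succ]
      simp only [List.foldl_cons]
      rw [ih]
      simp [pow_succ]; ring

theorem binFmt_length (n : Nat) (h : 1 ≤ n) : (binFmt n).length = Nat.size n := by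
  induction n using Nat.strong_induction_on with
  | _ n ih =>
    by_cases h2 : n < 2
    · have : n = 1 := by omega
      subst this; simp [binFmt]
    · rw [binFmt]
      simp only [if_neg h2, List.length_append, List.length_cons, List.length_nil]
      rw [ih (n / 2) (Nat.div_lt_self (by omega) (by omega)) (by omega)]
      -- Nat.size (n/2) + 1 = Nat.size n for n ≥ 2
      have hs1 : n / 2 < 2 ^ Nat.size (n / 2) := Nat.lt_size_self _
      have hs2 : 2 ^ (Nat.size (n / 2) - 1) ≤ n / 2 := by
        have : Nat.size (n / 2) - 1 < Nat.size (n / 2) := by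
          have : 1 ≤ Nat.size (n / 2) := by
            rcases Nat.eq_zero_or_pos (Nat.size (n / 2)) with h0 | h0
            · exfalso; have := Nat.size_eq_zero.mp h0; omega
            · omega
          omega
        exact Nat.lt_size.mp this
      have hp : 1 ≤ Nat.size (n / 2) := by
        rcases Nat.eq_zero_or_pos (Nat.size (n / 2)) with h0 | h0
        · exfalso; have := Nat.size_eq_zero.mp h0; omega
        · omega
      have e1 : Nat.size n ≤ Nat.size (n / 2) + 1 := by
        rw [Nat.size_le, pow_succ]
        omega
      have e2 : Nat.size (n / 2) + 1 ≤ Nat.size n := by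
        have : Nat.size (n / 2) < Nat.size n := by
          rw [Nat.lt_size]
          have : 2 ^ Nat.size (n / 2) = 2 * 2 ^ (Nat.size (n / 2) - 1) := by
            rw [← pow_succ']
            congr 1
            omega
          omega
        omega
      omega

-- ======== the common remainder function and its characterisation ========

theorem xor_top (n : Nat) (h : 4096 ≤ n) :
    n ^^^ (7973 <<< (Nat.size n - 13)) < 2 ^ (Nat.size n - 1) := by
  have h13 : 13 ≤ Nat.size n := by
    have : 12 < Nat.size n := Nat.lt_size.mpr (by norm_num; omega)
    omega
  set k := Nat.size n - 13 with hk
  have hsz : Nat.size n = k + 13 := by omega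
  have h1 : n < 2 ^ (k + 13) := by rw [← hsz]; exact Nat.lt_size_self n
  have h2 : 2 ^ (k + 12) ≤ n := by
    have : k + 12 < Nat.size n := by omega
    exact Nat.lt_size.mp this
  have hde : 2 ^ (k + 13) = 2 * 2 ^ (k + 12) := by rw [← pow_succ']
  have div1 : n / 2 ^ (k + 12) = 1 := by
    have hle : 1 ≤ n / 2 ^ (k + 12) := (Nat.one_le_div_iff (Nat.two_pow_pos _)).mpr h2
    have hlt : n / 2 ^ (k + 12) < 2 := by
      rw [Nat.div_lt_iff_lt_mul (Nat.two_pow_pos _)]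
      omega
    omega
  have div2 : (7973 <<< k) / 2 ^ (k + 12) = 1 := by
    rw [Nat.shiftLeft_eq, pow_add, ← Nat.div_div_eq_div_mul]
    rw [Nat.mul_div_cancel _ (Nat.two_pow_pos k)]
    norm_num
  have : (n ^^^ (7973 <<< k)) / 2 ^ (k + 12) = 0 := by
    rw [Nat.xor_div_two_pow, div1, div2]
    decide
  have hlt : n ^^^ (7973 <<< k) < 2 ^ (k + 12) :=
    (Nat.div_eq_zero_iff_lt (Nat.two_pow_pos _)).mp this
  have : Nat.size n - 1 = k + 12 := by omega
  rw [this]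
  exact hlt

theorem xor_top_lt (n : Nat) (h : 4096 ≤ n) :
    n ^^^ (7973 <<< (Nat.size n - 13)) < n := by
  have h1 := xor_top n h
  have h13 : 13 ≤ Nat.size n := by
    have : 12 < Nat.size n := Nat.lt_size.mpr (by norm_num; omega)
    omega
  have h2 : 2 ^ (Nat.size n - 1) ≤ n := Nat.lt_size.mp (by omega)
  omega

def redA (n : Nat) : Nat :=
  if 4096 ≤ n then redA (n ^^^ (7973 <<< (Nat.size n - 13))) else n
termination_by n
decreasing_by exact xor_top_lt n (by omega)

theorem redA_small {n : Nat} (h : n < 4096) : redA n = n := by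
  rw [redA]; simp [Nat.not_le.mpr h]

theorem redA_step {n : Nat} (h : 4096 ≤ n) :
    redA n = redA (n ^^^ (7973 <<< (Nat.size n - 13))) := by
  rw [redA]; simp [h]

theorem redA_lt (n : Nat) : redA n < 4096 := by
  induction n using Nat.strong_induction_on with
  | _ n ih =>
    by_cases h : 4096 ≤ n
    · rw [redA_step h]; exact ih _ (xor_top_lt n h)
    · rw [redA_small (by omega)]; omega

theorem size_two_mul_add (n b : Nat) (h : 1 ≤ n) (hb : b ≤ 1) :
    Nat.size (2 * n + b) = Nat.size n + 1 := by
  have h1 : n < 2 ^ Nat.size n := Nat.lt_size_self n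
  have hp : 1 ≤ Nat.size n := by
    rcases Nat.eq_zero_or_pos (Nat.size n) with h0 | h0
    · exfalso; have := Nat.size_eq_zero.mp h0; omega
    · omega
  have h2 : 2 ^ (Nat.size n - 1) ≤ n := Nat.lt_size.mp (by omega)
  have e1 : Nat.size (2 * n + b) ≤ Nat.size n + 1 := by
    rw [Nat.size_le, pow_succ]
    omega
  have e2 : Nat.size n + 1 ≤ Nat.size (2 * n + b) := by
    have : Nat.size n < Nat.size (2 * n + b) := by
      rw [Nat.lt_size]
      have : 2 ^ Nat.size n = 2 * 2 ^ (Nat.size n - 1) := by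
        rw [← pow_succ']; congr 1; omega
      omega
    omega
  omega

theorem xor_shift_step (n m b : Nat) (hb : b ≤ 1) :
    (2 * n + b) ^^^ (2 * m) = 2 * (n ^^^ m) + b := by
  have hdiv : ((2 * n + b) ^^^ (2 * m)) / 2 = n ^^^ m := by
    rw [Nat.xor_div_two]
    congr 1 <;> omega
  have hmod : ((2 * n + b) ^^^ (2 * m)) % 2 = b := by
    have := Nat.xor_mod_two_pow (a := 2 * n + b) (b := 2 * m) (n := 1)
    simp only [pow_one] at this
    rw [this]
    have e1 : (2 * n + b) % 2 = b := by omega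
    have e2 : (2 * m) % 2 = 0 := by omega
    rw [e1, e2]
    simp
  omega

theorem redA_two_mul_add (n b : Nat) (hb : b ≤ 1) :
    redA (2 * n + b) = redA (2 * redA n + b) := by
  induction n using Nat.strong_induction_on with
  | _ n ih =>
    by_cases h : 4096 ≤ n
    · -- one reduction step on n
      have h1 : 1 ≤ n := by omega
      set k := Nat.size n - 13 with hk
      have h13 : 13 ≤ Nat.size n := by
        have : 12 < Nat.size n := Nat.lt_size.mpr (by norm_num; omega)
        omega
      set m := n ^^^ (7973 <<< k) with hm
      have hmn : m < n := xor_top_lt n h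
      have hsz : Nat.size (2 * n + b) = Nat.size n + 1 := size_two_mul_add n b h1 hb
      have hbig : 4096 ≤ 2 * n + b := by omega
      have step1 : redA (2 * n + b) = redA ((2 * n + b) ^^^ (7973 <<< (k + 1))) := by
        have he : Nat.size (2 * n + b) - 13 = k + 1 := by omega
        rw [redA_step hbig, hsz] at *
        rw [he]
      have hsh : (7973 : Nat) <<< (k + 1) = 2 * (7973 <<< k) := by
        rw [Nat.shiftLeft_eq, Nat.shiftLeft_eq, pow_succ]
        ring
      have step2 : (2 * n + b) ^^^ (7973 <<< (k + 1)) = 2 * m + b := by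
        rw [hsh, xor_shift_step n (7973 <<< k) b hb]
      rw [step1, step2, ih m hmn, redA_step h]
    · have hn : redA n = n := redA_small (by omega)
      rw [hn]

-- the shift-register step computes redA one bit at a time
def stepB : Nat → Char → Nat := fun rem ch =>
  let rem := 2 * rem + (if ch = '1' then 1 else 0)
  if rem >>> 12 ≠ 0 then rem ^^^ 7973 else rem

theorem step_core (n b : Nat) (hb : b ≤ 1) :
    (if (2 * redA n + b) >>> 12 ≠ 0 then (2 * redA n + b) ^^^ 7973 else 2 * redA n + b)
      = redA (2 * n + b) := by
  have hr : redA n < 4096 := redA_lt n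
  set r2 := 2 * redA n + b with hr2
  have hsr : r2 >>> 12 = r2 / 4096 := by
    rw [Nat.shiftRight_eq_div_pow]
  have hp12 : (2 : Nat) ^ 12 = 4096 := by norm_num
  have hp13 : (2 : Nat) ^ 13 = 8192 := by norm_num
  by_cases hc : 4096 ≤ r2
  · have hne : r2 >>> 12 ≠ 0 := by
      rw [hsr]
      have : 1 ≤ r2 / 4096 := (Nat.one_le_div_iff (by norm_num)).mpr hc
      omega
    rw [if_pos hne]
    have hsz : Nat.size r2 = 13 := by
      have e1 : Nat.size r2 ≤ 13 := Nat.size_le.mpr (by omega)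
      have e2 : 12 < Nat.size r2 := Nat.lt_size.mpr (by omega)
      omega
    have hred : redA r2 = redA (r2 ^^^ 7973) := by
      rw [redA_step hc, hsz]
      norm_num
    have hlt : r2 ^^^ 7973 < 4096 := by
      have := xor_top r2 hc
      rw [hsz] at this
      norm_num at this
      exact this
    rw [redA_two_mul_add n b hb, ← hr2, hred, redA_small hlt]
  · have heq : r2 >>> 12 = 0 := by
      rw [hsr]
      exact Nat.div_eq_of_lt (by omega)
    rw [if_neg (by simp [heq])]
    rw [redA_two_mul_add n b hb, ← hr2, redA_small (by omega)]

theorem stepB_eq (a : Nat) (c : Char) :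
    stepB (redA a) c = redA (2 * a + (if c = '1' then 1 else 0)) := by
  by_cases hc : c = '1'
  · simp only [stepB, hc, if_pos]
    exact step_core a 1 (by omega)
  · simp only [stepB, if_neg hc]
    exact step_core a 0 (by omega)

theorem foldl_stepB (bs : List Char) (a : Nat) :
    bs.foldl stepB (redA a)
      = redA (bs.foldl (fun x c => 2 * x + (if c = '1' then 1 else 0)) a) := by
  induction bs generalizing a with
  | nil => simp
  | cons c bs ih =>
      simp only [List.foldl_cons]
      rw [stepB_eq a c, ih]

theorem foldl_val_replicate_zero (k : Nat) :
    (List.replicate k '0').foldl (fun x c => 2 * x + (if c = '1' then 1 else 0)) 0 = 0 := by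
  have := foldl_val_replicate k 0
  simpa using this

-- A's division loop computes redA
theorem divide_eq (fuel n : Nat) (h : Nat.size n ≤ fuel + 12) :
    divide fuel (binFmt n) = binFmt (redA n) := by
  induction fuel generalizing n with
  | zero =>
      have : n < 4096 := by
        have := Nat.size_le.mp (by omega : Nat.size n ≤ 12)
        norm_num at this ⊢
        omega
      rw [redA_small this, divide]
  | succ fuel ih =>
      by_cases hlen : (binFmt n).length > 12
      · have hn1 : 1 ≤ n := by
          by_contra hn
          have : n = 0 := by omega
          subst this
          simp [binFmt] at hlen
        have hsz : (binFmt n).length = Nat.size n := binFmt_length n hn1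
        have hbig : 4096 ≤ n := by
          by_contra hc
          have : Nat.size n ≤ 12 := Nat.size_le.mpr (by norm_num; omega)
          omega
        rw [divide]
        simp only [if_pos hlen]
        rw [foldl_range_appendzero]
        have hgl : (['1','1','1','1','1','0','0','1','0','0','1','0','1'] : List Char).length = 13 := by decide
        have hgv : ∀ k, binToNat ((['1','1','1','1','1','0','0','1','0','0','1','0','1'] : List Char) ++ List.replicate k '0') = 7973 * 2 ^ k := by
          intro k
          unfold binToNat
          rw [List.foldl_append]
          have : (['1','1','1','1','1','0','0','1','0','0','1','0','1'] : List Char).foldl (fun a c => 2 * a + (if c = '1' then 1 else 0)) 0 = 7973 := by decide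
          rw [this, foldl_val_replicate]
        rw [hgl, hgv, binToNat_binFmt, hsz, ← Nat.shiftLeft_eq]
        have hlt := xor_top n hbig
        have hszn : Nat.size (n ^^^ (7973 <<< (Nat.size n - 13))) ≤ Nat.size n - 1 := by
          rw [Nat.size_le]
          exact hlt
        rw [ih _ (by omega), ← redA_step hbig]
      · rw [divide]
        simp only [if_neg hlen]
        have hn : n < 4096 := by
          by_cases hn1 : 1 ≤ n
          · have hsz : (binFmt n).length = Nat.size n := binFmt_length n hn1
            have : Nat.size n ≤ 12 := by omega
            have := Nat.size_le.mp this
            norm_num at this ⊢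
            omega
          · omega
        rw [redA_small hn]

-- ===== VERDICT (by name: the statement is the Claim_ definition above) =====
theorem get_version_information_string_spec : Claim_equal_get_version_information_string := by
  unfold Claim_equal_get_version_information_string
  intro version _
  unfold Spec_get_version_information_string
  unfold get_version_information_string get_version_information_string_alt
  by_cases h : version < 7
  · simp [h]
  · simp only [if_neg h]
    have hv7 : 7 ≤ version.toNat := by omega
    set v := version.toNat with hv
    have hv1 : 1 ≤ v := by omega
    simp only [List.nil_append]
    rw [foldl_range_prepend]
    set p := 6 - (binFmt v).length with hp
    -- the value fed to the division is binFmt (v * 2^12)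
    have hstrip :
        stripZeros ((List.replicate p '0' ++ binFmt v) ++ List.replicate 12 '0')
          = binFmt (v * 2 ^ 12) := by
      rw [List.append_assoc, stripZeros_replicate, ← binFmt_mul_pow 12 v hv1,
        stripZeros_binFmt _ (Nat.mul_pos (by omega) (Nat.two_pow_pos 12))]
    rw [hstrip]
    -- A's loop result
    have hAdiv :
        divide (binFmt (v * 2 ^ 12)).length (binFmt (v * 2 ^ 12)) = binFmt (redA (v * 2 ^ 12)) := by
      apply divide_eq
      have : 1 ≤ v * 2 ^ 12 := Nat.mul_pos (by omega) (Nat.two_pow_pos 12)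
      rw [← binFmt_length _ this]
      omega
    rw [hAdiv]
    -- B's shift register result
    have hBrem :
        ((List.replicate p '0' ++ binFmt v) ++ List.replicate 12 '0').foldl
          stepB 0
          = redA (v * 2 ^ 12) := by
      have h0 : (0 : Nat) = redA 0 := by rw [redA_small (by norm_num)]
      rw [h0, foldl_stepB]
      congr 1
      rw [List.append_assoc, List.foldl_append, foldl_val_replicate_zero,
        ← binFmt_mul_pow 12 v hv1]
      have := foldl_val_binFmt (v * 2 ^ 12) 0
      simpa using this
    have hfun : (fun rem ch =>
        let rem := 2 * rem + (if ch = '1' then 1 else 0)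
        if rem >>> 12 ≠ 0 then rem ^^^ 7973 else rem) = stepB := rfl
    rw [hfun, hBrem]
    rw [foldl_range_prepend]
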